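-- pv_equiv track=rewrite | github.com/RichardGeh/KAI | evaluate_production_system.py | _generate_test_queries
-- ===== SOURCE A (Python) =====
-- from typing import List, Dict, Any, Tuple
--
-- TEST_QUERIES = {
--     "taxonomy": [
--         "Was ist ein Hund?",
--         "Was ist eine Katze?",
--         "Was ist ein Vogel?",
--         "Was ist ein Auto?",
--         "Was ist ein Computer?",
--         "Was ist eine Blume?",
--         "Was ist ein Tisch?",
--         "Was ist Wasser?",
--         "Was ist ein Baum?",
--         "Was ist eine Tür?",
--     ],
--     "properties": [
--         "Welche Eigenschaften hat ein Hund?",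
--         "Welche Farbe hat ein Apfel?",
--         "Wie groß ist ein Elefant?",
--         "Ist ein Auto schnell?",
--         "Ist Wasser flüssig?",
--         "Ist ein Diamant hart?",
--         "Welche Form hat ein Ball?",
--         "Wie schmeckt Schokolade?",
--         "Welche Temperatur hat Eis?",
--         "Ist Gold wertvoll?",
--     ],
--     "capabilities": [
--         "Was kann ein Vogel?",
--         "Was kann ein Computer?",
--         "Was kann eine Katze?",
--         "Was kann ein Flugzeug?",
--         "Was kann ein Mensch?",
--         "Was kann ein Roboter?",
--         "Was kann ein Telefon?",
--         "Was kann Wasser?",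
--         "Was kann ein Motor?",
--         "Was kann ein Mikroskop?",
--     ],
--     "multi_hop": [
--         "Ist ein Hund ein Lebewesen?",
--         "Kann ein Vogel ein Tier sein?",
--         "Ist eine Rose eine Pflanze?",
--         "Gehört ein Auto zu Fahrzeugen?",
--         "Ist ein Apfel gesund?",
--         "Kann ein Computer denken?",
--         "Ist ein Diamant ein Mineral?",
--         "Gehört Wasser zur Natur?",
--         "Ist ein Tisch ein Möbel?",
--         "Kann ein Flugzeug fliegen?",
--     ],
--     "complex": [
--         "Was ist der Unterschied zwischen einem Hund und einer Katze?",
--         "Warum können Vögel fliegen?",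
--         "Wie funktioniert ein Computer?",
--         "Was macht einen Diamant wertvoll?",
--         "Welche Tiere sind Säugetiere?",
--         "Was sind die Haupteigenschaften von Wasser?",
--         "Wie unterscheiden sich Bäume und Blumen?",
--         "Was sind die wichtigsten Teile eines Autos?",
--         "Welche Materialien sind hart?",
--         "Was können Menschen, das Tiere nicht können?",
--     ]
-- }
--
-- def _generate_test_queries(num_queries: int) -> List[Tuple[str, str]]:
--     """
--     Generiert Test-Queries aus den definierten Sets.
--
--     Args:
--         num_queries: Anzahl gewünschter Queries
--
--     Returns:
--         List von (query, query_type) Tuples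
--     """
--     queries = []
--     query_types = list(TEST_QUERIES.keys())
--
--     # Round-Robin durch Query-Types
--     while len(queries) < num_queries:
--         for query_type in query_types:
--             if len(queries) >= num_queries:
--                 break
--
--             # Wähle zyklisch aus dem Query-Set
--             query_set = TEST_QUERIES[query_type]
--             query = query_set[len(queries) % len(query_set)]
--             queries.append((query, query_type))
--
--     return queries[:num_queries]
-- ===== SOURCE B (Python) =====
-- from typing import List, Tuple
--
-- TEST_QUERIES = {
--     "taxonomy": [
--         "Was ist ein Hund?",
--         "Was ist eine Katze?",
--         "Was ist ein Vogel?",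
--         "Was ist ein Auto?",
--         "Was ist ein Computer?",
--         "Was ist eine Blume?",
--         "Was ist ein Tisch?",
--         "Was ist Wasser?",
--         "Was ist ein Baum?",
--         "Was ist eine Tür?",
--     ],
--     "properties": [
--         "Welche Eigenschaften hat ein Hund?",
--         "Welche Farbe hat ein Apfel?",
--         "Wie groß ist ein Elefant?",
--         "Ist ein Auto schnell?",
--         "Ist Wasser flüssig?",
--         "Ist ein Diamant hart?",
--         "Welche Form hat ein Ball?",
--         "Wie schmeckt Schokolade?",
--         "Welche Temperatur hat Eis?",
--         "Ist Gold wertvoll?",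
--     ],
--     "capabilities": [
--         "Was kann ein Vogel?",
--         "Was kann ein Computer?",
--         "Was kann eine Katze?",
--         "Was kann ein Flugzeug?",
--         "Was kann ein Mensch?",
--         "Was kann ein Roboter?",
--         "Was kann ein Telefon?",
--         "Was kann Wasser?",
--         "Was kann ein Motor?",
--         "Was kann ein Mikroskop?",
--     ],
--     "multi_hop": [
--         "Ist ein Hund ein Lebewesen?",
--         "Kann ein Vogel ein Tier sein?",
--         "Ist eine Rose eine Pflanze?",
--         "Gehört ein Auto zu Fahrzeugen?",
--         "Ist ein Apfel gesund?",
--         "Kann ein Computer denken?",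
--         "Ist ein Diamant ein Mineral?",
--         "Gehört Wasser zur Natur?",
--         "Ist ein Tisch ein Möbel?",
--         "Kann ein Flugzeug fliegen?",
--     ],
--     "complex": [
--         "Was ist der Unterschied zwischen einem Hund und einer Katze?",
--         "Warum können Vögel fliegen?",
--         "Wie funktioniert ein Computer?",
--         "Was macht einen Diamant wertvoll?",
--         "Welche Tiere sind Säugetiere?",
--         "Was sind die Haupteigenschaften von Wasser?",
--         "Wie unterscheiden sich Bäume und Blumen?",
--         "Was sind die wichtigsten Teile eines Autos?",
--         "Welche Materialien sind hart?",
--         "Was können Menschen, das Tiere nicht können?",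
--     ]
-- }
--
-- def _generate_test_queries(num_queries: int) -> List[Tuple[str, str]]:
--     """Tile a precomputed 10-pair period: the round-robin output repeats every
--     10 elements (5 types x 10-query sets share that period), so build that one
--     cycle, replicate it, and cut off the remainder."""
--     query_types = list(TEST_QUERIES.keys())
--     cycle = [(TEST_QUERIES[t][base + j], t)
--              for base in (0, 5)
--              for j, t in enumerate(query_types)]
--     m = max(num_queries, 0)
--     reps, rem = divmod(m, 10)
--     return cycle * reps + cycle[:rem]
-- ===== Notes on version B (the rewrite author's own statement) =====
-- stated objective: alternative
-- what changed: Instead of generating elements one by one in a nested while/for round-robin, B precomputes the fixed 10-pair period of the output (two zip-style rounds over the key list), then tiles it: cycle * (m // 10) + cycle[:m % 10]; correct because with 5 types and 10-query sets the round-robin stream is periodic with period lcm(5,10)=10.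
import Mathlib
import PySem

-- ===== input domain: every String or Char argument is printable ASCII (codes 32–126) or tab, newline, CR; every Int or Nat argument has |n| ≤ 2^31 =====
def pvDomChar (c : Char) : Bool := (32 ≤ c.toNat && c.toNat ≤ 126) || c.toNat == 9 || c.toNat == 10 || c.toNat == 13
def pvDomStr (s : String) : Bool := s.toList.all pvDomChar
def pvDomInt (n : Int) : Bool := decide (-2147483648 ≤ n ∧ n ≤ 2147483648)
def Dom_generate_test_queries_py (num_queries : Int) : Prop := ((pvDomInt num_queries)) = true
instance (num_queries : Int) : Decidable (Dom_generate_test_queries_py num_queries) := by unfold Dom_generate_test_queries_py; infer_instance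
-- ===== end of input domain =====

-- B replaces A's element-by-element nested while/for round-robin by precomputing the
-- output's fixed 10-pair period once and tiling it (cycle * reps + cycle[:rem]); objective: alternative.

-- ===== PORT A =====
def taxQ : List String :=
  ["Was ist ein Hund?", "Was ist eine Katze?", "Was ist ein Vogel?", "Was ist ein Auto?",
   "Was ist ein Computer?", "Was ist eine Blume?", "Was ist ein Tisch?", "Was ist Wasser?",
   "Was ist ein Baum?", "Was ist eine Tür?"]
def propQ : List String :=
  ["Welche Eigenschaften hat ein Hund?", "Welche Farbe hat ein Apfel?", "Wie groß ist ein Elefant?",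
   "Ist ein Auto schnell?", "Ist Wasser flüssig?", "Ist ein Diamant hart?", "Welche Form hat ein Ball?",
   "Wie schmeckt Schokolade?", "Welche Temperatur hat Eis?", "Ist Gold wertvoll?"]
def capQ : List String :=
  ["Was kann ein Vogel?", "Was kann ein Computer?", "Was kann eine Katze?", "Was kann ein Flugzeug?",
   "Was kann ein Mensch?", "Was kann ein Roboter?", "Was kann ein Telefon?", "Was kann Wasser?",
   "Was kann ein Motor?", "Was kann ein Mikroskop?"]
def mhQ : List String :=
  ["Ist ein Hund ein Lebewesen?", "Kann ein Vogel ein Tier sein?", "Ist eine Rose eine Pflanze?",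
   "Gehört ein Auto zu Fahrzeugen?", "Ist ein Apfel gesund?", "Kann ein Computer denken?",
   "Ist ein Diamant ein Mineral?", "Gehört Wasser zur Natur?", "Ist ein Tisch ein Möbel?",
   "Kann ein Flugzeug fliegen?"]
def cxQ : List String :=
  ["Was ist der Unterschied zwischen einem Hund und einer Katze?", "Warum können Vögel fliegen?",
   "Wie funktioniert ein Computer?", "Was macht einen Diamant wertvoll?", "Welche Tiere sind Säugetiere?",
   "Was sind die Haupteigenschaften von Wasser?", "Wie unterscheiden sich Bäume und Blumen?",
   "Was sind die wichtigsten Teile eines Autos?", "Welche Materialien sind hart?",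
   "Was können Menschen, das Tiere nicht können?"]

def TEST_QUERIES_py : PySem.Dict String (List String) :=
  PySem.Dict.mk [("taxonomy", taxQ), ("properties", propQ), ("capabilities", capQ),
                 ("multi_hop", mhQ), ("complex", cxQ)]

-- inner `for query_type in query_types` with its break; the index len(queries) % len(query_set)
-- is always in range for these literal non-empty sets, so pyGetD's default is never used
def forTypesA (n : Int) : List String → List (String × String) → List (String × String)
  | [], queries => queries
  | query_type :: rest, queries =>
    if (queries.length : Int) ≥ n then queries
    else
      let query_set := (PySem.Dict.get? TEST_QUERIES_py query_type).getD []
      let query := PySem.List.pyGetD query_set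
        (PySem.Int.mod (queries.length : Int) (query_set.length : Int)) ""
      forTypesA n rest (queries ++ [(query, query_type)])

-- termination facts for the while-loop below (cited by loopA's decreasing_by)
lemma forTypesA_length_le (n : Int) (ts : List String) (qs : List (String × String)) :
    qs.length ≤ (forTypesA n ts qs).length := by
  induction ts generalizing qs with
  | nil => simp [forTypesA]
  | cons t ts ih =>
    simp only [forTypesA]
    split_ifs
    · exact le_refl _
    · exact le_trans (by simp) (ih _)

lemma forTypesA_length_lt (n : Int) (t : String) (ts : List String)
    (qs : List (String × String)) (h : (qs.length : Int) < n) :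
    qs.length < (forTypesA n (t :: ts) qs).length := by
  simp only [forTypesA]
  split_ifs with hge
  · omega
  · exact lt_of_lt_of_le (by simp) (forTypesA_length_le n ts _)

-- outer `while len(queries) < num_queries`
def loopA (n : Int) (queries : List (String × String)) : List (String × String) :=
  if (queries.length : Int) < n then
    loopA n (forTypesA n (PySem.Dict.keys TEST_QUERIES_py) queries)
  else queries
termination_by (n - queries.length).toNat
decreasing_by
  have hlt := forTypesA_length_lt n "taxonomy"
    ["properties", "capabilities", "multi_hop", "complex"] queries (by omega)
  have hk : PySem.Dict.keys TEST_QUERIES_py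
      = "taxonomy" :: ["properties", "capabilities", "multi_hop", "complex"] := rfl
  rw [hk]
  omega

def generate_test_queries_py (num_queries : Int) : List (String × String) :=
  PySem.List.slice (loopA num_queries []) none (some num_queries)

-- ===== PORT B =====
-- the precomputed 10-pair period: two zip-style rounds (bases 0 and 5) over the key list;
-- the literal sets are non-empty and base+j is always in range, so pyGetD's default is never used
def cycleB : List (String × String) :=
  let query_types := PySem.Dict.keys TEST_QUERIES_py
  ([0, 5] : List Int).flatMap (fun base =>
    (PySem.List.enumerate query_types).map (fun jt =>
      (PySem.List.pyGetD ((PySem.Dict.get? TEST_QUERIES_py jt.2).getD []) (base + jt.1) "",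
       jt.2)))

def generate_test_queries_py_alt (num_queries : Int) : List (String × String) :=
  let m := max num_queries 0
  let reps := PySem.Int.floordiv m 10
  let rem := PySem.Int.mod m 10
  PySem.List.pyRepeat cycleB reps ++ PySem.List.slice cycleB none (some rem)

-- ===== PRECONDITION & SPEC =====
def Spec_generate_test_queries_py (num_queries : Int) (out : List (String × String)) : Prop := out = generate_test_queries_py_alt num_queries
instance (num_queries : Int) (out : List (String × String)) : Decidable (Spec_generate_test_queries_py num_queries out) := by unfold Spec_generate_test_queries_py; infer_instance

-- ===== CLAIM (what is proved, stated in full; the proofs are below) =====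
def Claim_equal_generate_test_queries_py : Prop := ∀ (num_queries : Int), Dom_generate_test_queries_py num_queries → Spec_generate_test_queries_py num_queries (generate_test_queries_py num_queries)

-- ===== LEMMAS AND PROOFS =====

-- the i-th pair of the round-robin stream, in closed form
def pvElem (i : Nat) : String × String :=
  let t := (PySem.Dict.keys TEST_QUERIES_py).getD (i % 5) ""
  let qs := (PySem.Dict.get? TEST_QUERIES_py t).getD []
  (qs.getD (i % 10) "", t)

lemma pyGetD_emod10 {α : Type} (xs : List α) (j : Nat) (d : α) :
    PySem.List.pyGetD xs ((j : Int) % 10) d = xs.getD (j % 10) d := by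
  rw [show ((j : Int) % 10) = ((j % 10 : Nat) : Int) by omega, PySem.List.pyGetD_natCast]

lemma keys_drop_succ (p : Nat) (hp : p < 5) :
    (PySem.Dict.keys TEST_QUERIES_py).drop p
      = (PySem.Dict.keys TEST_QUERIES_py).getD p "" :: (PySem.Dict.keys TEST_QUERIES_py).drop (p + 1) := by
  interval_cases p <;> rfl

lemma pair_step (j p : Nat) (hp : p < 5) (hj : j % 5 = p) :
    (List.range j).map pvElem
      ++ [(PySem.List.pyGetD
            ((PySem.Dict.get? TEST_QUERIES_py ((PySem.Dict.keys TEST_QUERIES_py).getD p "")).getD [])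
            (PySem.Int.mod (j : Int)
              (((PySem.Dict.get? TEST_QUERIES_py ((PySem.Dict.keys TEST_QUERIES_py).getD p "")).getD []).length : Int)) "",
            (PySem.Dict.keys TEST_QUERIES_py).getD p "")]
      = (List.range (j + 1)).map pvElem := by
  rw [List.range_succ, List.map_append]
  congr 1
  simp only [List.map_cons, List.map_nil]
  interval_cases p <;>
    simp [pvElem, hj, TEST_QUERIES_py, PySem.Dict.get?, PySem.Dict.keys, taxQ, propQ, capQ,
      mhQ, cxQ, pyGetD_emod10, List.getD]

lemma forTypesA_nil (n : Int) (qs : List (String × String)) : forTypesA n [] qs = qs := rfl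

lemma forTypesA_cons (n : Int) (t : String) (ts : List String) (qs : List (String × String)) :
    forTypesA n (t :: ts) qs
      = if (qs.length : Int) ≥ n then qs
        else forTypesA n ts (qs ++ [(PySem.List.pyGetD ((PySem.Dict.get? TEST_QUERIES_py t).getD [])
          (PySem.Int.mod (qs.length : Int) (((PySem.Dict.get? TEST_QUERIES_py t).getD []).length : Int)) "", t)]) := rfl

lemma forTypesA_suffix (n : Int) (q p j : Nat) (hpq : p + q = 5) (hj : j % 5 = p % 5) :
    forTypesA n ((PySem.Dict.keys TEST_QUERIES_py).drop p) ((List.range j).map pvElem)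
      = (List.range (max j (min (j + q) n.toNat))).map pvElem := by
  induction q generalizing p j with
  | zero =>
    have hp : p = 5 := by omega
    subst hp
    rw [show (PySem.Dict.keys TEST_QUERIES_py).drop 5 = [] from rfl, forTypesA_nil,
      show max j (min (j + 0) n.toNat) = j by omega]
  | succ q ih =>
    have hp : p < 5 := by omega
    rw [keys_drop_succ p hp, forTypesA_cons]
    simp only [List.length_map, List.length_range]
    split_ifs with hge
    · rw [show max j (min (j + (q + 1)) n.toNat) = j by omega]
    · rw [pair_step j p hp (by omega), ih (p + 1) (j + 1) (by omega) (by omega),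
        show max (j + 1) (min (j + 1 + q) n.toNat) = max j (min (j + (q + 1)) n.toNat) by omega]

lemma loopA_stop (n : Int) (qs : List (String × String)) (h : ¬ ((qs.length : Int) < n)) :
    loopA n qs = qs := by
  rw [loopA]
  simp [h]

lemma loopA_range (n : Int) (m : Nat) (h5 : m % 5 = 0) :
    loopA n ((List.range m).map pvElem) = (List.range (max m n.toNat)).map pvElem := by
  rw [loopA]
  simp only [List.length_map, List.length_range]
  split_ifs with h
  · have h0 := forTypesA_suffix n 5 0 m (by omega) (by omega)
    rw [List.drop_zero] at h0
    rw [h0]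
    by_cases hc : m + 5 ≤ n.toNat
    · rw [show max m (min (m + 5) n.toNat) = m + 5 by omega,
        loopA_range n (m + 5) (by omega),
        show max (m + 5) n.toNat = max m n.toNat by omega]
    · rw [show max m (min (m + 5) n.toNat) = max m n.toNat by omega,
        loopA_stop n _ (by simp only [List.length_map, List.length_range]; omega)]
  · rw [show max m n.toNat = m by omega]
termination_by (n.toNat - m)
decreasing_by omega

-- B-side: the precomputed cycle is exactly the first 10 closed-form pairs
lemma cycleB_eq : cycleB = (List.range 10).map pvElem := rfl

-- the closed-form stream is periodic with period 10
lemma pvElem_period (j : Nat) : pvElem (10 + j) = pvElem j := by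
  unfold pvElem
  rw [show (10 + j) % 5 = j % 5 by omega, show (10 + j) % 10 = j % 10 by omega]

-- tiling: q full periods plus a partial one reproduce the stream prefix
lemma tile (q r : Nat) :
    (List.range (10 * q + r)).map pvElem
      = (List.replicate q ((List.range 10).map pvElem)).flatten ++ (List.range r).map pvElem := by
  induction q with
  | zero => simp
  | succ q ih =>
    rw [show 10 * (q + 1) + r = 10 + (10 * q + r) by ring, List.range_add, List.map_append,
      List.map_map]
    have hmap : (List.range (10 * q + r)).map (pvElem ∘ (10 + ·))
        = (List.range (10 * q + r)).map pvElem := by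
      refine List.map_congr_left fun j _ => ?_
      exact pvElem_period j
    rw [hmap, ih, List.replicate_succ, List.flatten_cons, List.append_assoc]

lemma altB_range (n : Int) :
    generate_test_queries_py_alt n = (List.range n.toNat).map pvElem := by
  unfold generate_test_queries_py_alt
  have hm : max n 0 = ((n.toNat : Nat) : Int) := by omega
  rw [hm]
  have hdiv : PySem.Int.floordiv ((n.toNat : Nat) : Int) 10 = ((n.toNat / 10 : Nat) : Int) := by
    exact_mod_cast PySem.Int.floordiv_natCast n.toNat 10
  have hmod : PySem.Int.mod ((n.toNat : Nat) : Int) 10 = ((n.toNat % 10 : Nat) : Int) := by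
    exact_mod_cast PySem.Int.mod_natCast n.toNat 10
  show PySem.List.pyRepeat cycleB (PySem.Int.floordiv ((n.toNat : Nat) : Int) 10)
      ++ PySem.List.slice cycleB none (some (PySem.Int.mod ((n.toNat : Nat) : Int) 10))
    = List.map pvElem (List.range n.toNat)
  rw [hdiv, hmod, PySem.List.slice_to _ (by omega)]
  simp only [Int.toNat_natCast, PySem.List.pyRepeat, cycleB_eq]
  rw [← List.map_take, List.take_range,
    show min (n.toNat % 10) 10 = n.toNat % 10 by omega, ← tile,
    show 10 * (n.toNat / 10) + n.toNat % 10 = n.toNat by omega]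

-- ===== VERDICT (by name: the statement is the Claim_ definition above) =====
theorem generate_test_queries_py_spec : Claim_equal_generate_test_queries_py := by
  intro n _
  unfold Spec_generate_test_queries_py
  unfold generate_test_queries_py
  have h0 : ([] : List (String × String)) = (List.range 0).map pvElem := rfl
  rw [h0, loopA_range n 0 (by omega), altB_range,
    show max 0 n.toNat = n.toNat by omega]
  by_cases hn : 0 ≤ n
  · rw [PySem.List.slice_to _ hn]
    exact List.take_of_length_le (by simp)
  · have hz : n.toNat = 0 := by omega
    rw [hz]
    simp [PySem.List.slice]
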